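-- pv_equiv track=rewrite | github.com/adipartosh/Pheno.ai-home-assingment | src/dna_etl/txt_processor.py | most_common_codon
-- ===== SOURCE A (Python) =====
-- from typing import List, Dict, Any, Union
-- from collections import Counter
--
-- def most_common_codon(per_seq_info_lst: List[Dict[str, Any]]) -> str:
--     """
--     Aggregate codon counts across all sequences (from calculate_per_sequence output)
--     and returns the most common codon(s) as a single space-separated string.
--     :param per_seq_info_lst: List of per-sequence info dicts
--     :return: Most common codon(s) as a space-separated string
--     """
--     # Merge all per-sequence codon histograms into one counter
--     total = Counter()
--     for entry in per_seq_info_lst: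
--         # entry represents a single sequence result:
--         # {"gc_content": <float>, "codons": {<codon>: <count>, ...}}
--         total.update(entry["codons"])  # adds each codon count into the total
--
--     max_count = -1
--     winners: List[str] = []
--     for codon, cnt in total.items():
--         if cnt > max_count:
--             max_count = cnt
--             winners = [codon]
--         elif cnt == max_count:
--             winners.append(codon)
--
--     winners.sort()  # deterministic order
--     return " ".join(winners)
-- ===== SOURCE B (Python) =====
-- def most_common_codon(per_seq_info_lst):
--     """Sort-based aggregation: flatten all (codon, count) pairs, sort them by codon,
--     then one linear scan over the sorted pairs groups equal codons, sums each run,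
--     and keeps the codons whose run-sum is maximal (they come out already sorted).
--     No dictionary/Counter is built."""
--     pairs = []
--     for entry in per_seq_info_lst:
--         pairs.extend(entry["codons"].items())
--     pairs.sort(key=lambda p: p[0])
--     winners = []
--     best = None
--     i = 0
--     n = len(pairs)
--     while i < n:
--         codon = pairs[i][0]
--         s = 0
--         while i < n and pairs[i][0] == codon:
--             s += pairs[i][1]
--             i += 1
--         if best is None or s > best:
--             best = s
--             winners = [codon]
--         elif s == best:
--             winners.append(codon)
--     return " ".join(winners)
-- ===== Notes on version B (the rewrite author's own statement) =====
-- stated objective: alternative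
-- what changed: Replaces A's Counter/dict aggregation plus fused max-tracking loop with a sort-based algorithm: flatten all (codon, count) pairs, sort them by codon, and aggregate by a single grouping scan over the sorted list that sums each run and keeps the maximal runs (no dictionary is built; winners come out already sorted).
-- intended difference: On inputs whose aggregated codon counts are all below -1 and where some codon with a nonempty name attains the maximal count, A returns '' because its running maximum starts at the sentinel -1, while B returns the sorted codons of maximal aggregated count, which is the intended most-common answer. — e.g. on most_common_codon([[("codons", [("AAA", -2)])]]): A returns "", B returns "AAA"
import Mathlib
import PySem

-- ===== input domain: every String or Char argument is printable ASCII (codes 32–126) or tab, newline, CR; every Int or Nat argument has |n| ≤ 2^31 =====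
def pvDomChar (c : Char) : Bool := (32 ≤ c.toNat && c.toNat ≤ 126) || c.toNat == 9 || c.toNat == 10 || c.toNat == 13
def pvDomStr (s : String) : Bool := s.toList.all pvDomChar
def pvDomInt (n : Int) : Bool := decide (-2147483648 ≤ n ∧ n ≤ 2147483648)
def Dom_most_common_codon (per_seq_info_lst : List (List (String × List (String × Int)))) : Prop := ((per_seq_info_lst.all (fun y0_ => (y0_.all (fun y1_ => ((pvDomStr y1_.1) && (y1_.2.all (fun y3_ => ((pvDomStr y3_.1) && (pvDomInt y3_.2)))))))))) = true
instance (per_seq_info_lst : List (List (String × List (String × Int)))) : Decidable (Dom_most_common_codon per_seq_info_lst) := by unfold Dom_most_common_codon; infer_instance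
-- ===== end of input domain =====

-- B aggregates by sort-then-group-scan (flatten all pairs, sort by codon, sum each run, keep the max runs)
-- instead of A's Counter/dict aggregation plus fused max loop (objective: alternative); on the exceptional
-- inputs where every aggregated count is < -1, B returns the true argmax codons where A's -1 sentinel yields "".

-- ===== PORT A =====
-- entry["codons"] as the (codon, count) items of the entry's codons dict (shared input parser)
def pvEntryCodons (entry : List (String × List (String × Int))) : List (String × Int) :=
  (PySem.Dict.ofList ((PySem.Dict.ofList entry).getD "codons" [])).items

-- merge loop: total = Counter(); for entry: total.update(entry["codons"])  (Counter.update adds counts)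
def pvTotalA (per_seq_info_lst : List (List (String × List (String × Int)))) : PySem.Dict String Int :=
  per_seq_info_lst.foldl
    (fun t entry =>
      (pvEntryCodons entry).foldl
        (fun t p => t.modify p.1 0 (fun c => c + p.2)) t)
    PySem.Dict.empty

def most_common_codon (per_seq_info_lst : List (List (String × List (String × Int)))) : String :=
  let total := pvTotalA per_seq_info_lst
  -- fused loop: max_count = -1; winners = []; for codon, cnt in total.items(): …
  let res := total.items.foldl
    (fun (s : Int × List String) p =>
      if p.2 > s.1 then (p.2, [p.1])
      else if p.2 = s.1 then (s.1, s.2 ++ [p.1])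
      else s)
    ((-1 : Int), ([] : List String))
  PySem.Str.join " " (PySem.List.sorted res.2 (fun x => x) false)

-- ===== PORT B =====
-- outer while loop of Source B: the run of pairs with the head's codon is the inner while
-- (takeWhile = the pairs the inner loop consumes, dropWhile = where i points afterwards)
-- (fuel = remaining list length, a pure totality guard for the shrinking index loop)
def pvScanB : Nat → List (String × Int) → Option Int → List String → List String
  | _, [], _, winners => winners
  | 0, _ :: _, _, winners => winners
  | fuel + 1, (c, v) :: rest, best, winners =>
    let s := v + ((rest.takeWhile (fun q => q.1 == c)).map (fun q => q.2)).sum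
    let rest' := rest.dropWhile (fun q => q.1 == c)
    match best with
    | none => pvScanB fuel rest' (some s) [c]
    | some b =>
      if s > b then pvScanB fuel rest' (some s) [c]
      else if s = b then pvScanB fuel rest' (some b) (winners ++ [c])
      else pvScanB fuel rest' (some b) winners

def most_common_codon_alt (per_seq_info_lst : List (List (String × List (String × Int)))) : String :=
  -- pairs = []; for entry: pairs.extend(entry["codons"].items())
  let pairs := per_seq_info_lst.foldl (fun acc entry => acc ++ pvEntryCodons entry) []
  -- pairs.sort(key=lambda p: p[0])
  let sp := PySem.List.sorted pairs (fun p => p.1) false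
  PySem.Str.join " " (pvScanB sp.length sp none [])

-- ===== PRECONDITION & SPEC =====
-- Pre_ excludes exactly the inputs where entry["codons"] raises KeyError in both Pythons: an entry dict without the key "codons".
def Pre_most_common_codon (per_seq_info_lst : List (List (String × List (String × Int)))) : Prop :=
  ∀ entry ∈ per_seq_info_lst, "codons" ∈ entry.map Prod.fst
instance (per_seq_info_lst : List (List (String × List (String × Int)))) : Decidable (Pre_most_common_codon per_seq_info_lst) := by unfold Pre_most_common_codon; infer_instance

def pvWitness_most_common_codon : (List (List (String × List (String × Int)))) :=
  [[("codons", [("ATG", 2)])]]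

-- D_ helper: codon c's aggregated count, summed over the entries' parsed codon items
def pvCodonTotal (per_seq_info_lst : List (List (String × List (String × Int)))) (c : String) : Int :=
  (per_seq_info_lst.map (fun e => ((pvEntryCodons e).lookup c).getD 0)).sum

-- On inputs whose aggregated codon counts are all below -1 (and a codon with a nonempty name attains the maximum),
-- A returns "" because its running maximum starts at the sentinel -1, while B returns the sorted codons of maximal
-- aggregated count — the intended most-common answer.
def D_most_common_codon (per_seq_info_lst : List (List (String × List (String × Int)))) : Prop :=
  ∃ e ∈ per_seq_info_lst, ∃ p ∈ pvEntryCodons e, p.1 ≠ "" ∧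
    pvCodonTotal per_seq_info_lst p.1 < -1 ∧
    ∀ e' ∈ per_seq_info_lst, ∀ p' ∈ pvEntryCodons e',
      pvCodonTotal per_seq_info_lst p'.1 ≤ pvCodonTotal per_seq_info_lst p.1
instance (per_seq_info_lst : List (List (String × List (String × Int)))) : Decidable (D_most_common_codon per_seq_info_lst) := by unfold D_most_common_codon; infer_instance

def Spec_most_common_codon (per_seq_info_lst : List (List (String × List (String × Int)))) (out : String) : Prop := ¬ D_most_common_codon per_seq_info_lst → out = most_common_codon_alt per_seq_info_lst
instance (per_seq_info_lst : List (List (String × List (String × Int)))) (out : String) : Decidable (Spec_most_common_codon per_seq_info_lst out) := by unfold Spec_most_common_codon; infer_instance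

def pvDiffWitness_most_common_codon : (List (List (String × List (String × Int)))) :=
  [[("codons", [("AAA", -2)])]]
def pvDiffWitnessOut_most_common_codon : String × String := ("", "AAA")

-- ===== CLAIM (what is proved, stated in full; the proofs are below) =====
def Claim_unchanged_most_common_codon : Prop := ∀ (per_seq_info_lst : List (List (String × List (String × Int)))), Dom_most_common_codon per_seq_info_lst → Pre_most_common_codon per_seq_info_lst → Spec_most_common_codon per_seq_info_lst (most_common_codon per_seq_info_lst)
def Claim_exact_most_common_codon : Prop := ∀ (per_seq_info_lst : List (List (String × List (String × Int)))), Dom_most_common_codon per_seq_info_lst → Pre_most_common_codon per_seq_info_lst → D_most_common_codon per_seq_info_lst → most_common_codon per_seq_info_lst ≠ most_common_codon_alt per_seq_info_lst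
def Claim_changed_most_common_codon : Prop := Dom_most_common_codon (pvDiffWitness_most_common_codon) ∧ Pre_most_common_codon (pvDiffWitness_most_common_codon) ∧ D_most_common_codon (pvDiffWitness_most_common_codon) ∧ most_common_codon (pvDiffWitness_most_common_codon) = pvDiffWitnessOut_most_common_codon.1 ∧ most_common_codon_alt (pvDiffWitness_most_common_codon) = pvDiffWitnessOut_most_common_codon.2 ∧ pvDiffWitnessOut_most_common_codon.1 ≠ pvDiffWitnessOut_most_common_codon.2

-- ===== LEMMAS AND PROOFS =====

theorem pv_lookup_eq {A : Type} (l : List (String × A)) (k : String) :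
    l.lookup k = (l.find? (fun p => p.1 == k)).map (fun p => p.2) := by
  induction l with
  | nil => rfl
  | cons p rest ih =>
    rw [List.find?_cons]
    by_cases hk : p.1 = k
    · have hb : (p.1 == k) = true := by simpa using hk
      have hb' : (k == p.1) = true := by simpa using hk.symm
      simp [List.lookup, hb, hb']
    · have hb : (p.1 == k) = false := by simpa using hk
      have hb' : (k == p.1) = false := by simpa using fun h => hk h.symm
      simp [List.lookup, hb, hb', ih]

-- proof-side key set of the aggregated counter
def pvKeysD (per_seq_info_lst : List (List (String × List (String × Int)))) : List String :=
  PySem.Set.ofList (per_seq_info_lst.flatMap (fun e => (pvEntryCodons e).map Prod.fst))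

theorem pv_mem_keysD (lst : List (List (String × List (String × Int)))) (c : String) :
    c ∈ pvKeysD lst ↔ ∃ e ∈ lst, ∃ p ∈ pvEntryCodons e, p.1 = c := by
  unfold pvKeysD
  rw [PySem.Set.mem_ofList, List.mem_flatMap]
  constructor
  · rintro ⟨e, he, hc⟩
    obtain ⟨p, hp, hpc⟩ := List.mem_map.mp hc
    exact ⟨e, he, p, hp, hpc⟩
  · rintro ⟨e, he, p, hp, hpc⟩
    exact ⟨e, he, List.mem_map.mpr ⟨p, hp, hpc⟩⟩

theorem pv_inner_getD (its : List (String × Int)) (t : PySem.Dict String Int) (c : String) :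
    (its.foldl (fun t p => t.modify p.1 0 (fun x => x + p.2)) t).getD c 0
      = t.getD c 0 + ((its.filter (fun p => p.1 == c)).map (fun p => p.2)).sum := by
  induction its generalizing t with
  | nil => simp
  | cons p rest ih =>
    simp only [List.foldl_cons, List.filter_cons, ih, PySem.Dict.getD_modify]
    by_cases hc : c = p.1
    · simp [hc]; ring
    · have : (p.1 == c) = false := by simpa using fun h => hc h.symm
      simp [hc, this]

theorem pv_assoc_sum (its : List (String × Int)) (c : String) (h : (its.map Prod.fst).Nodup) :
    ((its.filter (fun p => p.1 == c)).map (fun p => p.2)).sum = ((PySem.Dict.mk its).get? c).getD 0 := by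
  induction its with
  | nil => simp [PySem.Dict.get?]
  | cons p rest ih =>
    rw [List.map_cons] at h
    obtain ⟨hk, hnd⟩ := List.nodup_cons.mp h
    rw [PySem.Dict.get?_mk_cons, List.filter_cons]
    by_cases hc : p.1 = c
    · have hfil : rest.filter (fun q => q.1 == c) = [] := by
        rw [List.filter_eq_nil_iff]
        intro q hq hqc
        have : q.1 = p.1 := by
          have hqc' : q.1 = c := by simpa using hqc
          rw [hqc', hc]
        exact hk (this ▸ List.mem_map_of_mem hq)
      simp [hc, hfil]
    · have hb : (p.1 == c) = false := by simpa using hc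
      simp [hb, ih hnd]

theorem pv_total_getD (lst : List (List (String × List (String × Int)))) (c : String) :
    (pvTotalA lst).getD c 0 = pvCodonTotal lst c := by
  suffices h : ∀ (l : List (List (String × List (String × Int)))) (t : PySem.Dict String Int),
      (l.foldl (fun t entry =>
        (pvEntryCodons entry).foldl
          (fun t p => t.modify p.1 0 (fun c => c + p.2)) t) t).getD c 0 = t.getD c 0 + pvCodonTotal l c by
    simpa [pvTotalA] using h lst PySem.Dict.empty
  intro l
  induction l with
  | nil => intro t; simp [pvCodonTotal]
  | cons e rest ih =>
    intro t
    rw [List.foldl_cons, ih, pv_inner_getD,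
        pv_assoc_sum _ c (by
          have := PySem.Dict.nodup_keys_ofList (κ := String) (ν := Int) ((PySem.Dict.ofList e).getD "codons" [])
          simpa [PySem.Dict.keys, pvEntryCodons] using this)]
    have h1 : ((PySem.Dict.mk (pvEntryCodons e)).get? c).getD 0
        = ((pvEntryCodons e).lookup c).getD 0 := by
      rw [pv_lookup_eq]; rfl
    simp only [pvCodonTotal, List.map_cons, List.sum_cons, h1]
    ring

theorem pv_total_keys (lst : List (List (String × List (String × Int)))) :
    (pvTotalA lst).keys = pvKeysD lst := by
  suffices h : ∀ (l : List (List (String × List (String × Int)))) (t : PySem.Dict String Int),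
      (l.foldl (fun t entry =>
        (pvEntryCodons entry).foldl
          (fun t p => t.modify p.1 0 (fun c => c + p.2)) t) t).keys
        = PySem.Set.update t.keys (l.flatMap (fun e => (pvEntryCodons e).map Prod.fst)) by
    have := h lst PySem.Dict.empty
    simpa [pvTotalA, pvKeysD, PySem.Dict.keys_empty, PySem.Set.update_nil_left] using this
  intro l
  induction l with
  | nil => intro t; simp [PySem.Set.update_nil]
  | cons e rest ih =>
    intro t
    rw [List.foldl_cons, ih, PySem.Dict.keys_foldl_modify_key, List.flatMap_cons, PySem.Set.update_append]

theorem pv_total_nodup (lst : List (List (String × List (String × Int)))) :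
    (pvTotalA lst).keys.Nodup := by
  suffices h : ∀ (l : List (List (String × List (String × Int)))) (t : PySem.Dict String Int),
      t.keys.Nodup →
      (l.foldl (fun t entry =>
        (pvEntryCodons entry).foldl
          (fun t p => t.modify p.1 0 (fun c => c + p.2)) t) t).keys.Nodup by
    exact h lst PySem.Dict.empty (by simp [PySem.Dict.keys_empty])
  intro l
  induction l with
  | nil => intro t ht; simpa using ht
  | cons e rest ih =>
    intro t ht
    exact ih _ (PySem.Dict.nodup_keys_foldl_modify_key _ _ _ _ _ ht)

set_option maxRecDepth 4000 in
theorem pv_fused (its : List (String × Int)) (mc : Int) (ws : List String) :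
    its.foldl
      (fun (s : Int × List String) p =>
        if p.2 > s.1 then (p.2, [p.1])
        else if p.2 = s.1 then (s.1, s.2 ++ [p.1])
        else s) (mc, ws)
      = (its.foldl (fun a p => max a p.2) mc,
         (if mc = its.foldl (fun a p => max a p.2) mc then ws else [])
           ++ (its.filter (fun p => p.2 == its.foldl (fun a p => max a p.2) mc)).map (fun p => p.1)) := by
  induction its generalizing mc ws with
  | nil => simp
  | cons p rest ih =>
    have hinit : ∀ (a : Int), a ≤ rest.foldl (fun x q => max x q.2) a :=
      fun a => (PySem.List.le_foldl_max_int rest (fun q => q.2) a).1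
    simp only [List.foldl_cons, List.filter_cons]
    rcases lt_trichotomy mc p.2 with h1 | h2 | h3
    · -- p.2 > mc : reset winners
      have hM : max mc p.2 = p.2 := max_eq_right (le_of_lt h1)
      have hstep : (if p.2 > mc then (p.2, [p.1]) else if p.2 = mc then (mc, ws ++ [p.1]) else (mc, ws)) = (p.2, [p.1]) := by
        simp [h1]
      simp only [hstep, hM]
      rw [ih]
      have hmc : ¬ (mc = rest.foldl (fun x q => max x q.2) p.2) := by
        have := hinit p.2
        omega
      rw [if_neg hmc]
      by_cases he : p.2 = rest.foldl (fun x q => max x q.2) p.2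
      · have hb : (p.2 == rest.foldl (fun x q => max x q.2) p.2) = true := by simpa using he
        rw [if_pos he]
        simp [hb]
      · have hb : (p.2 == rest.foldl (fun x q => max x q.2) p.2) = false := by simpa using he
        simp [he, hb]
    · -- p.2 = mc : append to winners
      have hM : max mc p.2 = mc := max_eq_left (le_of_eq h2.symm)
      have hstep : (if p.2 > mc then (p.2, [p.1]) else if p.2 = mc then (mc, ws ++ [p.1]) else (mc, ws)) = (mc, ws ++ [p.1]) := by
        simp [h2.symm]
      simp only [hstep, hM]
      rw [ih]
      by_cases he : mc = rest.foldl (fun x q => max x q.2) mc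
      · have hb : (p.2 == rest.foldl (fun x q => max x q.2) mc) = true := by
          simp [← h2, ← he]
        rw [if_pos he, if_pos he]
        simp [hb]
      · have hb : (p.2 == rest.foldl (fun x q => max x q.2) mc) = false := by
          simp [← h2]; exact fun hx => he hx
        simp [he, hb]
    · -- p.2 < mc : skip
      have hM : max mc p.2 = mc := max_eq_left (le_of_lt h3)
      have hstep : (if p.2 > mc then (p.2, [p.1]) else if p.2 = mc then (mc, ws ++ [p.1]) else (mc, ws)) = (mc, ws) := by
        have : ¬ p.2 > mc := not_lt.mpr (le_of_lt h3)
        have hne : ¬ p.2 = mc := ne_of_lt h3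
        simp [this, hne]
      simp only [hstep, hM]
      rw [ih]
      have hb : (p.2 == rest.foldl (fun x q => max x q.2) mc) = false := by
        have := hinit mc
        have : ¬ p.2 = rest.foldl (fun x q => max x q.2) mc := by omega
        simpa using this
      simp [hb]

-- ===== B-side: groups of the sorted pair list =====

-- proof-side view of pvScanB's outer loop: the list of (codon, run-sum) groups it visits
def pvGroups : List (String × Int) → List (String × Int)
  | [] => []
  | (c, v) :: rest =>
    (c, v + ((rest.takeWhile (fun q => q.1 == c)).map (fun q => q.2)).sum) ::
      pvGroups (rest.dropWhile (fun q => q.1 == c))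
termination_by l => l.length
decreasing_by
  · simp only [List.length_cons]
    exact Nat.lt_succ_of_le (List.Sublist.length_le (List.dropWhile_sublist _))

theorem pv_scan_some (n : Nat) (l : List (String × Int)) (hn : l.length ≤ n) (b : Int) (ws : List String) :
    pvScanB n l (some b) ws
      = ((pvGroups l).foldl
          (fun (s : Int × List String) p =>
            if p.2 > s.1 then (p.2, [p.1])
            else if p.2 = s.1 then (s.1, s.2 ++ [p.1])
            else s) (b, ws)).2 := by
  induction n generalizing l b ws with
  | zero =>
    cases l with
    | nil => simp [pvScanB, pvGroups]
    | cons p rest => simp at hn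
  | succ n ih =>
    cases l with
    | nil => simp [pvScanB, pvGroups]
    | cons p rest =>
      obtain ⟨c, v⟩ := p
      have hlen : (rest.dropWhile (fun q => q.1 == c)).length ≤ n := by
        have := List.Sublist.length_le (List.dropWhile_sublist (l := rest) (p := fun q => q.1 == c))
        simp only [List.length_cons, Nat.succ_le_succ_iff] at hn
        omega
      rw [pvGroups]
      simp only [pvScanB, List.foldl_cons]
      set s := v + ((rest.takeWhile (fun q => q.1 == c)).map (fun q => q.2)).sum with hs
      by_cases h1 : s > b
      · rw [if_pos h1, ih _ hlen]
        simp [h1]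
      · rw [if_neg h1]
        by_cases h2 : s = b
        · rw [if_pos h2, ih _ hlen]
          simp [h2]
        · rw [if_neg h2, ih _ hlen]
          simp [h1, h2]

theorem pv_scan_none (n : Nat) (c : String) (v : Int) (rest : List (String × Int)) :
    pvScanB (n + 1) ((c, v) :: rest) none []
      = pvScanB n (rest.dropWhile (fun q => q.1 == c))
          (some (v + ((rest.takeWhile (fun q => q.1 == c)).map (fun q => q.2)).sum)) [c] := by
  rfl

-- all keys of the dropped suffix are strictly above the head key, in a key-sorted list
theorem pv_drop_gt (c : String) (v : Int) (rest : List (String × Int))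
    (h : ((c, v) :: rest).Pairwise (fun a b => a.1 ≤ b.1)) :
    ∀ q ∈ rest.dropWhile (fun q => q.1 == c), c < q.1 := by
  intro q hq
  have hmem : q ∈ rest := List.Sublist.mem hq (List.dropWhile_sublist _)
  have hle : c ≤ q.1 := (List.pairwise_cons.mp h).1 q hmem
  rcases lt_or_eq_of_le hle with h' | h'
  · exact h'
  · exfalso
    cases hd : rest.dropWhile (fun q => q.1 == c) with
    | nil => rw [hd] at hq; cases hq
    | cons r0 rs =>
      have hr0 : ¬ (r0.1 == c) = true := by
        have := List.head?_dropWhile_not (fun q => q.1 == c) rest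
        rw [hd] at this
        simpa using this
      have hr0' : c < r0.1 := by
        have hr0mem : r0 ∈ rest := List.Sublist.mem (hd ▸ List.mem_cons_self) (List.dropWhile_sublist _)
        have : c ≤ r0.1 := (List.pairwise_cons.mp h).1 r0 hr0mem
        rcases lt_or_eq_of_le this with h'' | h''
        · exact h''
        · exact absurd (by simpa using h''.symm) hr0
      rw [hd] at hq
      rcases List.mem_cons.mp hq with rfl | hq'
      · exact absurd (by simpa using h'.symm) hr0
      · have hsorted' : (r0 :: rs).Pairwise (fun a b => a.1 ≤ b.1) :=
          (List.Pairwise.sublist (hd ▸ List.dropWhile_sublist _) ((List.pairwise_cons.mp h).2))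
        have : r0.1 ≤ q.1 := (List.pairwise_cons.mp hsorted').1 q hq'
        exact absurd h' (ne_of_lt (lt_of_lt_of_le hr0' this))

-- keys of the groups are the keys of the list
theorem pv_groups_mem_keys (l : List (String × Int)) (c : String) :
    c ∈ (pvGroups l).map Prod.fst ↔ c ∈ l.map Prod.fst := by
  induction l using pvGroups.induct with
  | case1 => simp [pvGroups]
  | case2 c0 v rest ih =>
    rw [pvGroups]
    simp only [List.map_cons, List.mem_cons, ih]
    constructor
    · rintro (rfl | h)
      · exact Or.inl rfl
      · obtain ⟨q, hq, rfl⟩ := List.mem_map.mp h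
        exact Or.inr (List.mem_map_of_mem (List.Sublist.mem hq (List.dropWhile_sublist _)))
    · rintro (rfl | h)
      · exact Or.inl rfl
      · obtain ⟨q, hq, rfl⟩ := List.mem_map.mp h
        by_cases hc : q.1 = c0
        · exact Or.inl hc
        · refine Or.inr (List.mem_map_of_mem ?_)
          have := List.takeWhile_append_dropWhile (p := fun q => q.1 == c0) (l := rest)
          rcases List.mem_append.mp (this ▸ hq) with h1 | h2
          · exact absurd (by simpa using List.mem_takeWhile_imp h1) hc
          · exact h2

theorem pv_groups_keys_lt (l : List (String × Int))
    (h : l.Pairwise (fun a b => a.1 ≤ b.1)) :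
    ((pvGroups l).map Prod.fst).Pairwise (fun a b => a < b) := by
  induction l using pvGroups.induct with
  | case1 => simp [pvGroups]
  | case2 c v rest ih =>
    rw [pvGroups]
    simp only [List.map_cons, List.pairwise_cons]
    have htail : (rest.dropWhile (fun q => q.1 == c)).Pairwise (fun a b => a.1 ≤ b.1) :=
      List.Pairwise.sublist (List.dropWhile_sublist _) ((List.pairwise_cons.mp h).2)
    constructor
    · intro k hk
      obtain ⟨g, hg, rfl⟩ := List.mem_map.mp hk
      have : g.1 ∈ (rest.dropWhile (fun q => q.1 == c)).map Prod.fst :=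
        (pv_groups_mem_keys _ _).mp (List.mem_map_of_mem hg)
      obtain ⟨q, hq, hqe⟩ := List.mem_map.mp this
      exact hqe ▸ pv_drop_gt c v rest h q hq
    · exact ih htail

-- group values are the filter-sums of the list, on a key-sorted list
theorem pv_groups_val (l : List (String × Int))
    (h : l.Pairwise (fun a b => a.1 ≤ b.1)) :
    ∀ p ∈ pvGroups l, p.2 = ((l.filter (fun q => q.1 == p.1)).map (fun q => q.2)).sum := by
  induction l using pvGroups.induct with
  | case1 => simp [pvGroups]
  | case2 c v rest ih =>
    have hsplit := List.takeWhile_append_dropWhile (p := fun q => q.1 == c) (l := rest)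
    have htail : (rest.dropWhile (fun q => q.1 == c)).Pairwise (fun a b => a.1 ≤ b.1) :=
      List.Pairwise.sublist (List.dropWhile_sublist _) ((List.pairwise_cons.mp h).2)
    rw [pvGroups]
    intro p hp
    rcases List.mem_cons.mp hp with rfl | hp'
    · have hfilt : ((c, v) :: rest).filter (fun q => q.1 == c)
          = (c, v) :: rest.takeWhile (fun q => q.1 == c) := by
        rw [List.filter_cons]
        simp only [beq_self_eq_true, if_true]
        congr 1
        conv_lhs => rw [← hsplit]
        rw [List.filter_append]
        have h1 : (rest.takeWhile (fun q => q.1 == c)).filter (fun q => q.1 == c)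
            = rest.takeWhile (fun q => q.1 == c) :=
          List.filter_eq_self.mpr (fun q hq => List.mem_takeWhile_imp (p := fun (q : String × Int) => q.1 == c) hq)
        have h2 : (rest.dropWhile (fun q => q.1 == c)).filter (fun q => q.1 == c) = [] := by
          rw [List.filter_eq_nil_iff]
          intro q hq
          have := pv_drop_gt c v rest h q hq
          simpa using ne_of_gt this
        rw [h1, h2, List.append_nil]
      rw [hfilt]
      simp
    · have hkey : c < p.1 := by
        have : p.1 ∈ (rest.dropWhile (fun q => q.1 == c)).map Prod.fst :=
          (pv_groups_mem_keys _ _).mp (List.mem_map_of_mem hp')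
        obtain ⟨q, hq, hqe⟩ := List.mem_map.mp this
        exact hqe ▸ pv_drop_gt c v rest h q hq
      have hfilt : ((c, v) :: rest).filter (fun q => q.1 == p.1)
          = (rest.dropWhile (fun q => q.1 == c)).filter (fun q => q.1 == p.1) := by
        rw [List.filter_cons]
        have hne : ((c, v).1 == p.1) = false := by simpa using ne_of_lt hkey
        rw [if_neg (by simp [hne])]
        conv_lhs => rw [← hsplit]
        rw [List.filter_append]
        have h1 : (rest.takeWhile (fun q => q.1 == c)).filter (fun q => q.1 == p.1) = [] := by
          rw [List.filter_eq_nil_iff]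
          intro q hq hqp
          have hqc : q.1 = c := by simpa using List.mem_takeWhile_imp (p := fun (q : String × Int) => q.1 == c) hq
          have : q.1 = p.1 := by simpa using hqp
          exact absurd (hqc ▸ this) (ne_of_lt hkey)
        rw [h1, List.nil_append]
      rw [hfilt]
      exact ih htail p hp'

-- the flattened pair list and its filter-sums
def pvPairs (lst : List (List (String × List (String × Int)))) : List (String × Int) :=
  lst.foldl (fun acc entry => acc ++ pvEntryCodons entry) []

theorem pv_pairs_eq (lst : List (List (String × List (String × Int)))) :
    pvPairs lst = lst.flatMap pvEntryCodons := by
  unfold pvPairs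
  simpa using PySem.List.foldl_append_eq_flatMap pvEntryCodons (l := lst) (acc := [])

theorem pv_entry_nodup (e : List (String × List (String × Int))) :
    ((pvEntryCodons e).map Prod.fst).Nodup := by
  have := PySem.Dict.nodup_keys_ofList (κ := String) (ν := Int) ((PySem.Dict.ofList e).getD "codons" [])
  simpa [PySem.Dict.keys, pvEntryCodons] using this

theorem pv_pairs_filtersum (lst : List (List (String × List (String × Int)))) (c : String) :
    (((pvPairs lst).filter (fun q => q.1 == c)).map (fun q => q.2)).sum = pvCodonTotal lst c := by
  rw [pv_pairs_eq]
  induction lst with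
  | nil => simp [pvCodonTotal]
  | cons e rest ih =>
    rw [List.flatMap_cons, List.filter_append, List.map_append, List.sum_append, ih]
    have h1 : (((pvEntryCodons e).filter (fun q => q.1 == c)).map (fun q => q.2)).sum
        = ((pvEntryCodons e).lookup c).getD 0 := by
      rw [pv_assoc_sum _ c (pv_entry_nodup e), pv_lookup_eq]; rfl
    simp only [pvCodonTotal, List.map_cons, List.sum_cons, h1]

theorem pv_pairs_mem_keys (lst : List (List (String × List (String × Int)))) (c : String) :
    c ∈ (pvPairs lst).map Prod.fst ↔ c ∈ pvKeysD lst := by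
  rw [pv_pairs_eq]
  unfold pvKeysD
  rw [PySem.Set.mem_ofList]
  simp only [List.mem_flatMap, List.mem_map]
  constructor
  · rintro ⟨p, ⟨e, he, hp⟩, rfl⟩
    exact ⟨e, he, p, hp, rfl⟩
  · rintro ⟨e, he, p, hp, rfl⟩
    exact ⟨p, ⟨e, he, hp⟩, rfl⟩

-- the sorted pair list and its groups, as B's port visits them
def pvSP (lst : List (List (String × List (String × Int)))) : List (String × Int) :=
  PySem.List.sorted (pvPairs lst) (fun p => p.1) false

def pvGs (lst : List (List (String × List (String × Int)))) : List (String × Int) :=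
  pvGroups (pvSP lst)

theorem pv_sp_pairwise (lst : List (List (String × List (String × Int)))) :
    (pvSP lst).Pairwise (fun a b => a.1 ≤ b.1) :=
  PySem.List.sorted_pairwise (pvPairs lst) (fun p => p.1)

theorem pv_gs_mem (lst : List (List (String × List (String × Int)))) (c : String) :
    c ∈ (pvGs lst).map Prod.fst ↔ c ∈ pvKeysD lst := by
  rw [pvGs, pv_groups_mem_keys, ← pv_pairs_mem_keys]
  exact ((PySem.List.sorted_perm (pvPairs lst) (fun p => p.1) false).map Prod.fst).mem_iff

theorem pv_gs_val (lst : List (List (String × List (String × Int)))) :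
    ∀ p ∈ pvGs lst, p.2 = pvCodonTotal lst p.1 := by
  intro p hp
  rw [pv_groups_val (pvSP lst) (pv_sp_pairwise lst) p hp, ← pv_pairs_filtersum lst p.1]
  exact List.Perm.sum_eq
    ((((PySem.List.sorted_perm (pvPairs lst) (fun p => p.1) false).filter _).map _))

theorem pv_gs_keys_lt (lst : List (List (String × List (String × Int)))) :
    ((pvGs lst).map Prod.fst).Pairwise (fun a b => a < b) :=
  pv_groups_keys_lt (pvSP lst) (pv_sp_pairwise lst)

theorem pv_alt_def (lst : List (List (String × List (String × Int)))) :
    most_common_codon_alt lst = PySem.Str.join " " (pvScanB (pvSP lst).length (pvSP lst) none []) := rfl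

theorem pv_alt_nil (lst : List (List (String × List (String × Int))))
    (h : pvGs lst = []) : most_common_codon_alt lst = "" := by
  have hsp : pvSP lst = [] := by
    cases hc : pvSP lst with
    | nil => rfl
    | cons p rest =>
      obtain ⟨c, v⟩ := p
      rw [pvGs, hc, pvGroups] at h
      cases h
  rw [pv_alt_def, hsp]
  rfl

theorem pv_alt_char (lst : List (List (String × List (String × Int))))
    (g : String × Int) (t : List (String × Int)) (h : pvGs lst = g :: t) :
    most_common_codon_alt lst
      = PySem.Str.join " "
          (((g :: t).filter
              (fun p => p.2 == t.foldl (fun a p => max a p.2) g.2)).map Prod.fst) := by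
  cases hsp : pvSP lst with
  | nil =>
    rw [pvGs, hsp, pvGroups] at h
    cases h
  | cons p rest =>
    obtain ⟨c, v⟩ := p
    have hgs : (c, v + ((rest.takeWhile (fun q => q.1 == c)).map (fun q => q.2)).sum)
        :: pvGroups (rest.dropWhile (fun q => q.1 == c)) = g :: t := by
      rw [pvGs, hsp, pvGroups] at h
      exact h
    set s := v + ((rest.takeWhile (fun q => q.1 == c)).map (fun q => q.2)).sum with hs
    obtain ⟨hg, ht⟩ : (c, s) = g ∧ pvGroups (rest.dropWhile (fun q => q.1 == c)) = t := by
      exact ⟨(List.cons.injEq _ _ _ _ ▸ hgs).1, (List.cons.injEq _ _ _ _ ▸ hgs).2⟩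
    have hlen : (rest.dropWhile (fun q => q.1 == c)).length ≤ rest.length :=
      List.Sublist.length_le (List.dropWhile_sublist _)
    rw [pv_alt_def, hsp]
    simp only [List.length_cons]
    rw [pv_scan_none, pv_scan_some rest.length _ hlen, ht, pv_fused]
    subst hg
    simp only [List.filter_cons]
    by_cases he : s = t.foldl (fun a p => max a p.2) s
    · have hb : (s == t.foldl (fun a p => max a p.2) s) = true := by simpa using he
      rw [if_pos he, hb]
      rfl
    · have hb : (s == t.foldl (fun a p => max a p.2) s) = false := by simpa using he
      rw [if_neg he, hb]
      rfl

-- A's result, via pv_fused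
def pvMA (lst : List (List (String × List (String × Int)))) : Int :=
  (pvTotalA lst).items.foldl (fun a p => max a p.2) (-1)

theorem pv_a_char (lst : List (List (String × List (String × Int)))) :
    most_common_codon lst
      = PySem.Str.join " "
          (PySem.List.sorted
            (((pvTotalA lst).items.filter (fun p => p.2 == pvMA lst)).map (fun p => p.1))
            (fun x => x) false) := by
  simp only [most_common_codon]
  rw [pv_fused]
  simp only [ite_self, List.nil_append]
  rfl

-- every item of the aggregated dict carries its codon's total, and every key has its item
theorem pv_item_val (lst : List (List (String × List (String × Int))))
    (p : String × Int) (hp : p ∈ (pvTotalA lst).items) :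
    p.2 = pvCodonTotal lst p.1 := by
  rw [← pv_total_getD]
  exact (PySem.Dict.getD_of_mem_items _ hp (pv_total_nodup lst) 0).symm

theorem pv_key_item (lst : List (List (String × List (String × Int))))
    (k : String) (hk : k ∈ (pvTotalA lst).keys) :
    (k, pvCodonTotal lst k) ∈ (pvTotalA lst).items := by
  obtain ⟨v, hv⟩ : ∃ v, (pvTotalA lst).get? k = some v := by
    cases hq : (pvTotalA lst).get? k with
    | none => exact absurd ((PySem.Dict.get?_eq_none_iff_not_mem_keys _ _).mp hq) (not_not.mpr hk)
    | some v => exact ⟨v, rfl⟩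
  have hvd : v = pvCodonTotal lst k := by
    rw [← pv_total_getD, PySem.Dict.getD_of_get?_eq_some _ 0 hv]
  exact hvd ▸ PySem.Dict.mem_items_of_get?_eq_some _ hv

-- the maximal value among the groups (the head case of pvGs)
theorem pv_foldmax_spec (g : String × Int) (t : List (String × Int)) :
    (∃ p ∈ g :: t, p.2 = t.foldl (fun a p => max a p.2) g.2)
      ∧ ∀ p ∈ g :: t, p.2 ≤ t.foldl (fun a p => max a p.2) g.2 := by
  have hm : t.foldl (fun a p => max a p.2) g.2 = (t.map (fun p => p.2)).foldl max g.2 := by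
    rw [List.foldl_map]
  constructor
  · rcases PySem.List.foldl_max_mem (t.map (fun p => p.2)) g.2 with h | h
    · exact ⟨g, List.mem_cons_self, by rw [hm]; exact h.symm⟩
    · obtain ⟨p, hp, hpv⟩ := List.mem_map.mp h
      exact ⟨p, List.mem_cons_of_mem _ hp, by rw [hm]; exact hpv⟩
  · intro p hp
    rw [hm]
    rcases List.mem_cons.mp hp with rfl | hp'
    · exact (PySem.List.le_foldl_max (t.map (fun p => p.2)) p.2).1
    · exact (PySem.List.le_foldl_max (t.map (fun p => p.2)) g.2).2 _ (List.mem_map_of_mem hp')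

-- winners of B: membership and order
theorem pv_wb_mem (lst : List (List (String × List (String × Int))))
    (g : String × Int) (t : List (String × Int)) (h : pvGs lst = g :: t) (c : String) :
    c ∈ ((g :: t).filter (fun p => p.2 == t.foldl (fun a p => max a p.2) g.2)).map Prod.fst
      ↔ c ∈ pvKeysD lst ∧ pvCodonTotal lst c = t.foldl (fun a p => max a p.2) g.2 := by
  constructor
  · intro hc
    obtain ⟨p, hpf, rfl⟩ := List.mem_map.mp hc
    obtain ⟨hpm, hpv⟩ := List.mem_filter.mp hpf
    refine ⟨(pv_gs_mem lst p.1).mp (List.mem_map_of_mem (h ▸ hpm)), ?_⟩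
    rw [← pv_gs_val lst p (h ▸ hpm)]
    simpa using hpv
  · rintro ⟨hc, hv⟩
    have : c ∈ (pvGs lst).map Prod.fst := (pv_gs_mem lst c).mpr hc
    obtain ⟨p, hp, rfl⟩ := List.mem_map.mp this
    refine List.mem_map_of_mem (List.mem_filter.mpr ⟨h ▸ hp, ?_⟩)
    rw [pv_gs_val lst p hp]
    simpa using hv

theorem pv_wb_pairwise (lst : List (List (String × List (String × Int))))
    (g : String × Int) (t : List (String × Int)) (h : pvGs lst = g :: t) :
    (((g :: t).filter (fun p => p.2 == t.foldl (fun a p => max a p.2) g.2)).map Prod.fst).Pairwise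
      (fun a b => a < b) := by
  have := pv_gs_keys_lt lst
  rw [h] at this
  exact List.Pairwise.sublist (List.Sublist.map Prod.fst (List.filter_sublist)) this

-- winners of A: membership
theorem pv_wa_mem (lst : List (List (String × List (String × Int)))) (c : String) :
    c ∈ ((pvTotalA lst).items.filter (fun p => p.2 == pvMA lst)).map (fun p => p.1)
      ↔ c ∈ pvKeysD lst ∧ pvCodonTotal lst c = pvMA lst := by
  constructor
  · intro hc
    obtain ⟨p, hpf, rfl⟩ := List.mem_map.mp hc
    obtain ⟨hpm, hpv⟩ := List.mem_filter.mp hpf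
    refine ⟨?_, ?_⟩
    · rw [← pv_total_keys]
      exact List.mem_map_of_mem hpm
    · rw [← pv_item_val lst p hpm]
      simpa using hpv
  · rintro ⟨hc, hv⟩
    have hk : c ∈ (pvTotalA lst).keys := by rw [pv_total_keys]; exact hc
    refine List.mem_map.mpr ⟨(c, pvCodonTotal lst c), List.mem_filter.mpr ⟨pv_key_item lst c hk, ?_⟩, rfl⟩
    simpa using hv

theorem pv_wa_nodup (lst : List (List (String × List (String × Int)))) :
    (((pvTotalA lst).items.filter (fun p => p.2 == pvMA lst)).map (fun p => p.1)).Nodup :=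
  List.Nodup.sublist (List.Sublist.map _ (List.filter_sublist)) (pv_total_nodup lst)

-- A's sentinel max agrees with B's group max as soon as some total reaches -1
theorem pv_max_eq (lst : List (List (String × List (String × Int))))
    (g : String × Int) (t : List (String × Int)) (h : pvGs lst = g :: t)
    (hge : ∃ k ∈ pvKeysD lst, -1 ≤ pvCodonTotal lst k) :
    pvMA lst = t.foldl (fun a p => max a p.2) g.2 := by
  obtain ⟨k0, hk0, hk0ge⟩ := hge
  set MB := t.foldl (fun a p => max a p.2) g.2 with hMB
  obtain ⟨⟨pm, hpm, hpmv⟩, hub⟩ := pv_foldmax_spec g t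
  -- every key's total is at most MB
  have hkey_le : ∀ k ∈ pvKeysD lst, pvCodonTotal lst k ≤ MB := by
    intro k hk
    obtain ⟨p, hp, rfl⟩ := List.mem_map.mp ((pv_gs_mem lst k).mpr hk)
    rw [← pv_gs_val lst p hp]
    exact hub p (h ▸ hp)
  -- MB is some key's total
  have hMB_key : ∃ k ∈ pvKeysD lst, pvCodonTotal lst k = MB := by
    refine ⟨pm.1, (pv_gs_mem lst pm.1).mp (List.mem_map_of_mem (h ▸ hpm)), ?_⟩
    rw [← pv_gs_val lst pm (h ▸ hpm)]
    exact hpmv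
  -- pvMA bounds
  have hMA_ub : ∀ p ∈ (pvTotalA lst).items, p.2 ≤ pvMA lst := by
    intro p hp
    unfold pvMA
    have hm : (pvTotalA lst).items.foldl (fun a p => max a p.2) (-1)
        = ((pvTotalA lst).items.map (fun p => p.2)).foldl max (-1) := by rw [List.foldl_map]
    rw [hm]
    exact (PySem.List.le_foldl_max _ _).2 _ (List.mem_map_of_mem hp)
  have hMA_mem : pvMA lst = -1 ∨ ∃ p ∈ (pvTotalA lst).items, p.2 = pvMA lst := by
    unfold pvMA
    have hm : (pvTotalA lst).items.foldl (fun a p => max a p.2) (-1)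
        = ((pvTotalA lst).items.map (fun p => p.2)).foldl max (-1) := by rw [List.foldl_map]
    rw [hm]
    rcases PySem.List.foldl_max_mem ((pvTotalA lst).items.map (fun p => p.2)) (-1) with hx | hx
    · exact Or.inl hx
    · obtain ⟨p, hp, hpv⟩ := List.mem_map.mp hx
      exact Or.inr ⟨p, hp, hpv⟩
  apply le_antisymm
  · rcases hMA_mem with hx | ⟨p, hp, hpv⟩
    · -- pvMA = -1 ≤ total k0 ≤ MB
      rw [hx]
      exact le_trans hk0ge (hkey_le k0 hk0)
    · rw [← hpv, pv_item_val lst p hp]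
      apply hkey_le
      rw [← pv_total_keys]
      exact List.mem_map_of_mem hp
  · -- MB = total of a key ≤ value of its item ≤ pvMA
    obtain ⟨k, hk, hkv⟩ := hMB_key
    rw [← hkv]
    have hk' : k ∈ (pvTotalA lst).keys := by rw [pv_total_keys]; exact hk
    exact hMA_ub _ (pv_key_item lst k hk')

theorem pv_eq_of_ge (lst : List (List (String × List (String × Int))))
    (hge0 : ∃ e ∈ lst, ∃ p ∈ pvEntryCodons e, -1 ≤ pvCodonTotal lst p.1) :
    most_common_codon lst = most_common_codon_alt lst := by
  obtain ⟨e, he, p, hp, hge⟩ := hge0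
  have hk0 : p.1 ∈ pvKeysD lst := (pv_mem_keysD lst p.1).mpr ⟨e, he, p, hp, rfl⟩
  cases hgs : pvGs lst with
  | nil =>
    exfalso
    have := (pv_gs_mem lst p.1).mpr hk0
    rw [hgs] at this
    cases this
  | cons g t =>
    rw [pv_a_char, pv_alt_char lst g t hgs]
    congr 1
    have hmax := pv_max_eq lst g t hgs ⟨p.1, hk0, hge⟩
    apply PySem.List.sorted_id_eq_of_perm_of_pairwise
    · rw [List.perm_ext_iff_of_nodup
        (((pv_wb_pairwise lst g t hgs).imp (fun h => ne_of_lt h)))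
        (pv_wa_nodup lst)]
      intro c
      rw [pv_wb_mem lst g t hgs c, pv_wa_mem lst c, hmax]
    · exact (pv_wb_pairwise lst g t hgs).imp (fun h => le_of_lt h)

-- ===== A = "" and B = "" on the degenerate inputs (all totals below the -1 sentinel) =====

theorem pv_values_lt (lst : List (List (String × List (String × Int))))
    (hsec : ∀ e ∈ lst, ∀ p ∈ pvEntryCodons e, pvCodonTotal lst p.1 < -1) :
    ∀ p ∈ (pvTotalA lst).items, p.2 < -1 := by
  intro p hp
  have hk : p.1 ∈ pvKeysD lst := by
    rw [← pv_total_keys]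
    exact List.mem_map_of_mem hp
  obtain ⟨e, he, q, hq, hqc⟩ := (pv_mem_keysD lst p.1).mp hk
  rw [pv_item_val lst p hp, ← hqc]
  exact hsec e he q hq

theorem pv_A_empty (lst : List (List (String × List (String × Int))))
    (hsec : ∀ e ∈ lst, ∀ p ∈ pvEntryCodons e, pvCodonTotal lst p.1 < -1) :
    most_common_codon lst = "" := by
  rw [pv_a_char]
  suffices hfil : (pvTotalA lst).items.filter (fun p => p.2 == pvMA lst) = [] by
    rw [hfil]
    rfl
  rw [List.filter_eq_nil_iff]
  intro p hp
  have hMA : -1 ≤ pvMA lst := by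
    unfold pvMA
    have hm : (pvTotalA lst).items.foldl (fun a p => max a p.2) (-1)
        = ((pvTotalA lst).items.map (fun p => p.2)).foldl max (-1) := by rw [List.foldl_map]
    rw [hm]
    exact (PySem.List.le_foldl_max _ _).1
  have := pv_values_lt lst hsec p hp
  simpa using by omega

theorem pv_B_empty (lst : List (List (String × List (String × Int))))
    (hnf : ¬ (∃ e ∈ lst, ∃ p ∈ pvEntryCodons e, p.1 ≠ "" ∧
        ∀ e' ∈ lst, ∀ p' ∈ pvEntryCodons e',
          pvCodonTotal lst p'.1 ≤ pvCodonTotal lst p.1)) :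
    most_common_codon_alt lst = "" := by
  cases hgs : pvGs lst with
  | nil => exact pv_alt_nil lst hgs
  | cons g t =>
    rw [pv_alt_char lst g t hgs]
    set MB := t.foldl (fun a p => max a p.2) g.2 with hMB
    obtain ⟨⟨pm, hpm, hpmv⟩, hub⟩ := pv_foldmax_spec g t
    have hkey_le : ∀ k ∈ pvKeysD lst, pvCodonTotal lst k ≤ MB := by
      intro k hk
      obtain ⟨q, hq, rfl⟩ := List.mem_map.mp ((pv_gs_mem lst k).mpr hk)
      rw [← pv_gs_val lst q hq]
      exact hub q (hgs ▸ hq)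
    -- every winner is the empty codon
    have hall : ∀ c ∈ ((g :: t).filter (fun p => p.2 == MB)).map Prod.fst, c = "" := by
      intro c hc
      obtain ⟨hck, hcv⟩ := (pv_wb_mem lst g t hgs c).mp hc
      by_contra hcne
      apply hnf
      obtain ⟨e, he, q, hq, hqc⟩ := (pv_mem_keysD lst c).mp hck
      refine ⟨e, he, q, hq, by rw [hqc]; exact hcne, ?_⟩
      intro e' he' p' hp'
      rw [hqc, hcv]
      exact hkey_le p'.1 ((pv_mem_keysD lst p'.1).mpr ⟨e', he', p', hp', rfl⟩)
    -- the winner list is nonempty, nodup, all "" : it is [""]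
    have hmem : pm.1 ∈ ((g :: t).filter (fun p => p.2 == MB)).map Prod.fst :=
      List.mem_map_of_mem (List.mem_filter.mpr ⟨hpm, by simpa using hpmv⟩)
    have hnd : (((g :: t).filter (fun p => p.2 == MB)).map Prod.fst).Nodup :=
      ((pv_wb_pairwise lst g t hgs).imp (fun h => ne_of_lt h))
    cases hW : ((g :: t).filter (fun p => p.2 == MB)).map Prod.fst with
    | nil => rw [hW] at hmem; cases hmem
    | cons a t2 =>
      have ha : a = "" := hall a (hW ▸ List.mem_cons_self)
      cases t2 with
      | nil => rw [ha]; rfl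
      | cons b t3 =>
        exfalso
        have hb : b = "" := hall b (hW ▸ List.mem_cons_of_mem _ List.mem_cons_self)
        rw [hW] at hnd
        simp only [List.nodup_cons, List.mem_cons] at hnd
        exact hnd.1 (Or.inl (ha.trans hb.symm))

theorem pv_join_ne (l : List String) (x : String) (hx : x ∈ l) (hne : x ≠ "") :
    PySem.Str.join " " l ≠ "" := by
  cases l with
  | nil => cases hx
  | cons a t =>
      cases t with
      | nil =>
          have hxa : x = a := by simpa using hx
          intro h
          apply hne
          have h1 := congrArg String.toList h
          simp [PySem.Str.join, PySem.Chars.join_singleton] at h1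
          exact hxa ▸ h1
      | cons b t2 =>
          intro h
          have h1 := congrArg String.toList h
          simp [PySem.Str.join, PySem.Chars.join_cons_cons] at h1

-- ===== VERDICT (by name: the statement is the Claim_ definition above) =====
theorem most_common_codon_spec : Claim_unchanged_most_common_codon := by
  intro lst _ _
  unfold Spec_most_common_codon
  intro hD
  unfold D_most_common_codon at hD
  by_cases hsec : ∀ e ∈ lst, ∀ p ∈ pvEntryCodons e, pvCodonTotal lst p.1 < -1
  · have hnf : ¬ (∃ e ∈ lst, ∃ p ∈ pvEntryCodons e, p.1 ≠ "" ∧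
        ∀ e' ∈ lst, ∀ p' ∈ pvEntryCodons e',
          pvCodonTotal lst p'.1 ≤ pvCodonTotal lst p.1) := by
      rintro ⟨e, he, p, hp, hpne, hmax⟩
      exact hD ⟨e, he, p, hp, hpne, hsec e he p hp, hmax⟩
    rw [pv_A_empty lst hsec, pv_B_empty lst hnf]
  · push Not at hsec
    obtain ⟨e, he, p, hp, hge⟩ := hsec
    exact pv_eq_of_ge lst ⟨e, he, p, hp, hge⟩

theorem most_common_codon_changed : Claim_changed_most_common_codon := by
  unfold Claim_changed_most_common_codon; decide

theorem most_common_codon_tight : Claim_exact_most_common_codon := by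
  intro lst _ _ hD
  unfold D_most_common_codon at hD
  obtain ⟨e, he, p, hp, hpne, hlt, hmax⟩ := hD
  have hsec : ∀ e' ∈ lst, ∀ p' ∈ pvEntryCodons e', pvCodonTotal lst p'.1 < -1 :=
    fun e' he' p' hp' => lt_of_le_of_lt (hmax e' he' p' hp') hlt
  rw [pv_A_empty lst hsec]
  apply Ne.symm
  have hk : p.1 ∈ pvKeysD lst := (pv_mem_keysD lst p.1).mpr ⟨e, he, p, hp, rfl⟩
  cases hgs : pvGs lst with
  | nil =>
    exfalso
    have := (pv_gs_mem lst p.1).mpr hk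
    rw [hgs] at this
    cases this
  | cons g t =>
    rw [pv_alt_char lst g t hgs]
    obtain ⟨⟨pm, hpm, hpmv⟩, hub⟩ := pv_foldmax_spec g t
    -- p.1's total is the group maximum, so p.1 is a winner
    have hple : pvCodonTotal lst p.1 ≤ t.foldl (fun a p => max a p.2) g.2 := by
      obtain ⟨q, hq, hqc⟩ := List.mem_map.mp ((pv_gs_mem lst p.1).mpr hk)
      rw [← hqc, ← pv_gs_val lst q hq]
      exact hub q (hgs ▸ hq)
    have hpge : t.foldl (fun a p => max a p.2) g.2 ≤ pvCodonTotal lst p.1 := by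
      have hkm : pm.1 ∈ pvKeysD lst := (pv_gs_mem lst pm.1).mp (List.mem_map_of_mem (hgs ▸ hpm))
      obtain ⟨e', he', q', hq', hq'c⟩ := (pv_mem_keysD lst pm.1).mp hkm
      rw [← hpmv, pv_gs_val lst pm (hgs ▸ hpm), ← hq'c]
      exact hmax e' he' q' hq'
    have hmemw : p.1 ∈ ((g :: t).filter
        (fun q => q.2 == t.foldl (fun a p => max a p.2) g.2)).map Prod.fst :=
      (pv_wb_mem lst g t hgs p.1).mpr ⟨hk, le_antisymm hple hpge⟩
    exact pv_join_ne _ p.1 hmemw hpne
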